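-- pv_equiv track=rewrite | github.com/ROCmSoftwarePlatform/gpufort | python/gpufort/util/parsing.py | get_highest_level_arguments
-- ===== SOURCE A (Python) =====
-- def get_highest_level_arguments(tokens,
--                                 open_brackets=0,
--                                 separators=[","],
--                                 terminators=["::", "\n", "!"]):
--     # ex:
--     # input: ["parameter",",","intent","(","inout",")",",","dimension","(",":",",",":",")","::"]
--     # result : ["parameter", "intent(inout)", "dimension(:,:)" ]
--     result = []
--     idx = 0
--     current_substr = ""
--     criterion = len(tokens)
--     while criterion:
--         tk = tokens[idx]
--         idx += 1
--         criterion = idx < len(tokens)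
--         if tk in separators and open_brackets == 0:
--             if len(current_substr):
--                 result.append(current_substr)
--             current_substr = ""
--         elif tk in terminators:
--             criterion = False
--         else:
--             current_substr += tk
--         if tk == "(":
--             open_brackets += 1
--         elif tk == ")":
--             open_brackets -= 1
--     if len(current_substr):
--         result.append(current_substr)
--     return result
-- ===== SOURCE B (Python) =====
-- def get_highest_level_arguments(tokens,
--                                 open_brackets=0,
--                                 separators=[","],
--                                 terminators=["::", "\n", "!"]):
--     # Locate the stop point and the depth-0 separator positions in one scan,
--     # then slice the token list into groups and join each group.
--     depth = open_brackets
--     cuts = []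
--     end = len(tokens)
--     for i, tk in enumerate(tokens):
--         if tk in separators and depth == 0:
--             cuts.append(i)
--         elif tk in terminators:
--             end = i
--             break
--         if tk == "(":
--             depth += 1
--         elif tk == ")":
--             depth -= 1
--     starts = [0] + [c + 1 for c in cuts]
--     stops = cuts + [end]
--     groups = ["".join(tokens[a:b]) for a, b in zip(starts, stops)]
--     return [g for g in groups if g]
-- ===== Notes on version B (the rewrite author's own statement) =====
-- stated objective: alternative
-- what changed: Replaces A's single accumulating state machine (running string + result list) by a locate-then-partition shape: one scan records the stop index and the depth-0 separator positions, then the token list is sliced at those positions, each slice joined, and empty groups dropped.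
import Mathlib
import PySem

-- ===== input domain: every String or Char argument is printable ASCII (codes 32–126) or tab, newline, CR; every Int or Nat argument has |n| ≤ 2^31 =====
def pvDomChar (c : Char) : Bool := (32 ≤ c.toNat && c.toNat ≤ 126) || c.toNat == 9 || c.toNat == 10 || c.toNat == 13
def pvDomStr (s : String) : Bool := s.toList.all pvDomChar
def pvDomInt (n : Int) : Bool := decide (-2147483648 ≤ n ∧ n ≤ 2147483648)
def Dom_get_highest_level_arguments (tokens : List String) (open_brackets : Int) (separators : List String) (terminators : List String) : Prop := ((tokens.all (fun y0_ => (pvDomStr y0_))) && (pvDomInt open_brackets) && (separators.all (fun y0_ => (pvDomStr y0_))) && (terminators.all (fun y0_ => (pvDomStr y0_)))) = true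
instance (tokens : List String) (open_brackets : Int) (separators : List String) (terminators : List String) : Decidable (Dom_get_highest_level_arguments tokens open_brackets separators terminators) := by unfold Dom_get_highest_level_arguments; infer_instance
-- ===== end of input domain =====

-- B replaces A's single accumulating state machine by a locate-cuts-then-slice-and-join
-- decomposition (alternative structure, same cost); neither version mutates its arguments.

-- ===== PORT A =====
-- literal transliteration of A's while loop: index `idx`, running `open_brackets`,
-- accumulated `result` and `current_substr`; the terminator branch ends the loop.
def ghlaLoop (tokens separators terminators : List String) (idx : Nat) (open_brackets : Int)
    (result : List String) (current_substr : String) : List String :=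
  if h : idx < tokens.length then
    let tk := tokens[idx]
    if tk ∈ separators ∧ open_brackets = 0 then
      ghlaLoop tokens separators terminators (idx + 1)
        (if tk = "(" then open_brackets + 1 else if tk = ")" then open_brackets - 1 else open_brackets)
        (if current_substr.length ≠ 0 then result ++ [current_substr] else result) ""
    else if tk ∈ terminators then
      -- criterion = False: the loop ends; the trailing append of current_substr follows
      if current_substr.length ≠ 0 then result ++ [current_substr] else result
    else
      ghlaLoop tokens separators terminators (idx + 1)
        (if tk = "(" then open_brackets + 1 else if tk = ")" then open_brackets - 1 else open_brackets)
        result (current_substr ++ tk)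
  else
    if current_substr.length ≠ 0 then result ++ [current_substr] else result
termination_by tokens.length - idx
decreasing_by all_goals omega

def get_highest_level_arguments (tokens : List String) (open_brackets : Int) (separators : List String) (terminators : List String) : List String :=
  ghlaLoop tokens separators terminators 0 open_brackets [] ""

-- ===== PORT B =====
-- one scan recording depth-0 separator positions `cuts` and the stop index (Source B's for/break loop)
def ghlbScan (tokens separators terminators : List String) (i : Nat) (depth : Int)
    (cuts : List Nat) : List Nat × Nat :=
  if h : i < tokens.length then
    let tk := tokens[i]
    if tk ∈ separators ∧ depth = 0 then
      ghlbScan tokens separators terminators (i + 1)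
        (if tk = "(" then depth + 1 else if tk = ")" then depth - 1 else depth)
        (cuts ++ [i])
    else if tk ∈ terminators then (cuts, i)
    else
      ghlbScan tokens separators terminators (i + 1)
        (if tk = "(" then depth + 1 else if tk = ")" then depth - 1 else depth)
        cuts
  else (cuts, tokens.length)
termination_by tokens.length - i
decreasing_by all_goals omega

-- "".join(tokens[a:b]) for 0 ≤ a ≤ b (all slice bounds Source B produces are non-negative)
def ghlbSlice (tokens : List String) (a b : Nat) : String :=
  String.join ((tokens.drop a).take (b - a))

def get_highest_level_arguments_alt (tokens : List String) (open_brackets : Int) (separators : List String) (terminators : List String) : List String :=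
  let sc := ghlbScan tokens separators terminators 0 open_brackets []
  let starts := 0 :: sc.1.map (· + 1)
  let stops := sc.1 ++ [sc.2]
  let groups := (starts.zip stops).map (fun p => ghlbSlice tokens p.1 p.2)
  groups.filter (fun g => g ≠ "")

-- ===== PRECONDITION & SPEC =====
def Spec_get_highest_level_arguments (tokens : List String) (open_brackets : Int) (separators : List String) (terminators : List String) (out : List String) : Prop := out = get_highest_level_arguments_alt tokens open_brackets separators terminators
instance (tokens : List String) (open_brackets : Int) (separators : List String) (terminators : List String) (out : List String) : Decidable (Spec_get_highest_level_arguments tokens open_brackets separators terminators out) := by unfold Spec_get_highest_level_arguments; infer_instance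

-- ===== CLAIM (what is proved, stated in full; the proofs are below) =====
def Claim_equal_get_highest_level_arguments : Prop := ∀ (tokens : List String) (open_brackets : Int) (separators : List String) (terminators : List String), Dom_get_highest_level_arguments tokens open_brackets separators terminators → Spec_get_highest_level_arguments tokens open_brackets separators terminators (get_highest_level_arguments tokens open_brackets separators terminators)

-- ===== LEMMAS AND PROOFS =====

-- A's loop with `result`/`current_substr` as the only accumulators, `result` dropped
def ghlaSpec (tokens separators terminators : List String) (i : Nat) (d : Int) (cur : String) : List String :=
  if h : i < tokens.length then
    let tk := tokens[i]
    if tk ∈ separators ∧ d = 0 then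
      (if cur.length ≠ 0 then [cur] else []) ++
        ghlaSpec tokens separators terminators (i + 1)
          (if tk = "(" then d + 1 else if tk = ")" then d - 1 else d) ""
    else if tk ∈ terminators then
      if cur.length ≠ 0 then [cur] else []
    else
      ghlaSpec tokens separators terminators (i + 1)
        (if tk = "(" then d + 1 else if tk = ")" then d - 1 else d) (cur ++ tk)
  else
    if cur.length ≠ 0 then [cur] else []
termination_by tokens.length - i
decreasing_by all_goals omega

-- B's post-processing, generalised: groups from position `a`, cut list, end, with a pending prefix
def ghlGroups (tokens : List String) : String → Nat → List Nat → Nat → List String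
  | cur, a, [], e => if cur ++ ghlbSlice tokens a e ≠ "" then [cur ++ ghlbSlice tokens a e] else []
  | cur, a, c :: rest, e =>
      (if cur ++ ghlbSlice tokens a c ≠ "" then [cur ++ ghlbSlice tokens a c] else []) ++
      ghlGroups tokens "" (c + 1) rest e

-- ---- step equations for the three recursions ----

theorem ghlbScan_stop (tokens separators terminators : List String) (i : Nat) (d : Int)
    (cuts : List Nat) (hi : ¬ i < tokens.length) :
    ghlbScan tokens separators terminators i d cuts = (cuts, tokens.length) := by
  rw [ghlbScan]; rw [dif_neg hi]

theorem ghlbScan_sep (tokens separators terminators : List String) (i : Nat) (d : Int)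
    (cuts : List Nat) (hi : i < tokens.length) (hs : tokens[i] ∈ separators ∧ d = 0) :
    ghlbScan tokens separators terminators i d cuts =
      ghlbScan tokens separators terminators (i + 1)
        (if tokens[i] = "(" then d + 1 else if tokens[i] = ")" then d - 1 else d) (cuts ++ [i]) := by
  rw [ghlbScan]; rw [dif_pos hi, if_pos hs]

theorem ghlbScan_term (tokens separators terminators : List String) (i : Nat) (d : Int)
    (cuts : List Nat) (hi : i < tokens.length) (hs : ¬ (tokens[i] ∈ separators ∧ d = 0))
    (ht : tokens[i] ∈ terminators) :
    ghlbScan tokens separators terminators i d cuts = (cuts, i) := by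
  rw [ghlbScan]; rw [dif_pos hi, if_neg hs, if_pos ht]

theorem ghlbScan_else (tokens separators terminators : List String) (i : Nat) (d : Int)
    (cuts : List Nat) (hi : i < tokens.length) (hs : ¬ (tokens[i] ∈ separators ∧ d = 0))
    (ht : ¬ tokens[i] ∈ terminators) :
    ghlbScan tokens separators terminators i d cuts =
      ghlbScan tokens separators terminators (i + 1)
        (if tokens[i] = "(" then d + 1 else if tokens[i] = ")" then d - 1 else d) cuts := by
  rw [ghlbScan]; rw [dif_pos hi, if_neg hs, if_neg ht]

theorem ghlaSpec_stop (tokens separators terminators : List String) (i : Nat) (d : Int)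
    (cur : String) (hi : ¬ i < tokens.length) :
    ghlaSpec tokens separators terminators i d cur =
      if cur.length ≠ 0 then [cur] else [] := by
  rw [ghlaSpec]; rw [dif_neg hi]

theorem ghlaSpec_sep (tokens separators terminators : List String) (i : Nat) (d : Int)
    (cur : String) (hi : i < tokens.length) (hs : tokens[i] ∈ separators ∧ d = 0) :
    ghlaSpec tokens separators terminators i d cur =
      (if cur.length ≠ 0 then [cur] else []) ++
        ghlaSpec tokens separators terminators (i + 1)
          (if tokens[i] = "(" then d + 1 else if tokens[i] = ")" then d - 1 else d) "" := by
  rw [ghlaSpec]; rw [dif_pos hi, if_pos hs]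

theorem ghlaSpec_term (tokens separators terminators : List String) (i : Nat) (d : Int)
    (cur : String) (hi : i < tokens.length) (hs : ¬ (tokens[i] ∈ separators ∧ d = 0))
    (ht : tokens[i] ∈ terminators) :
    ghlaSpec tokens separators terminators i d cur =
      if cur.length ≠ 0 then [cur] else [] := by
  rw [ghlaSpec]; rw [dif_pos hi, if_neg hs, if_pos ht]

theorem ghlaSpec_else (tokens separators terminators : List String) (i : Nat) (d : Int)
    (cur : String) (hi : i < tokens.length) (hs : ¬ (tokens[i] ∈ separators ∧ d = 0))
    (ht : ¬ tokens[i] ∈ terminators) :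
    ghlaSpec tokens separators terminators i d cur =
      ghlaSpec tokens separators terminators (i + 1)
        (if tokens[i] = "(" then d + 1 else if tokens[i] = ")" then d - 1 else d)
        (cur ++ tokens[i]) := by
  rw [ghlaSpec]; rw [dif_pos hi, if_neg hs, if_neg ht]

theorem ghlaLoop_stop (tokens separators terminators : List String) (i : Nat) (d : Int)
    (res : List String) (cur : String) (hi : ¬ i < tokens.length) :
    ghlaLoop tokens separators terminators i d res cur =
      if cur.length ≠ 0 then res ++ [cur] else res := by
  rw [ghlaLoop]; rw [dif_neg hi]

theorem ghlaLoop_sep (tokens separators terminators : List String) (i : Nat) (d : Int)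
    (res : List String) (cur : String) (hi : i < tokens.length)
    (hs : tokens[i] ∈ separators ∧ d = 0) :
    ghlaLoop tokens separators terminators i d res cur =
      ghlaLoop tokens separators terminators (i + 1)
        (if tokens[i] = "(" then d + 1 else if tokens[i] = ")" then d - 1 else d)
        (if cur.length ≠ 0 then res ++ [cur] else res) "" := by
  rw [ghlaLoop]; rw [dif_pos hi, if_pos hs]

theorem ghlaLoop_term (tokens separators terminators : List String) (i : Nat) (d : Int)
    (res : List String) (cur : String) (hi : i < tokens.length)
    (hs : ¬ (tokens[i] ∈ separators ∧ d = 0)) (ht : tokens[i] ∈ terminators) :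
    ghlaLoop tokens separators terminators i d res cur =
      if cur.length ≠ 0 then res ++ [cur] else res := by
  rw [ghlaLoop]; rw [dif_pos hi, if_neg hs, if_pos ht]

theorem ghlaLoop_else (tokens separators terminators : List String) (i : Nat) (d : Int)
    (res : List String) (cur : String) (hi : i < tokens.length)
    (hs : ¬ (tokens[i] ∈ separators ∧ d = 0)) (ht : ¬ tokens[i] ∈ terminators) :
    ghlaLoop tokens separators terminators i d res cur =
      ghlaLoop tokens separators terminators (i + 1)
        (if tokens[i] = "(" then d + 1 else if tokens[i] = ")" then d - 1 else d)
        res (cur ++ tokens[i]) := by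
  rw [ghlaLoop]; rw [dif_pos hi, if_neg hs, if_neg ht]

-- ---- string/slice facts ----

theorem str_foldl_append (l : List String) (s : String) :
    List.foldl (fun r t => r ++ t) s l = s ++ List.foldl (fun r t => r ++ t) "" l := by
  induction l generalizing s with
  | nil => simp
  | cons a l ih =>
    simp only [List.foldl]
    rw [ih (s ++ a), ih ("" ++ a)]
    simp [String.append_assoc]

theorem join_cons (s : String) (l : List String) :
    String.join (s :: l) = s ++ String.join l := by
  simp only [String.join, List.foldl]
  rw [str_foldl_append]
  simp

theorem slice_empty (tokens : List String) (a b : Nat) (h : b ≤ a) :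
    ghlbSlice tokens a b = "" := by
  simp [ghlbSlice, Nat.sub_eq_zero_of_le h, String.join]

theorem slice_out (tokens : List String) (a b : Nat) (h : tokens.length ≤ a) :
    ghlbSlice tokens a b = "" := by
  simp [ghlbSlice, List.drop_eq_nil_of_le h, String.join]

theorem slice_cons (tokens : List String) (i b : Nat) (hi : i < tokens.length) (hb : i < b) :
    ghlbSlice tokens i b = tokens[i] ++ ghlbSlice tokens (i + 1) b := by
  unfold ghlbSlice
  rw [List.drop_eq_getElem_cons hi]
  have h1 : b - i = (b - (i + 1)) + 1 := by omega
  rw [h1, List.take_succ_cons, join_cons]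

-- ---- invariants of B's scan ----

theorem ghlbScan_acc (tokens separators terminators : List String) :
    ∀ n i d acc, tokens.length - i ≤ n →
      ghlbScan tokens separators terminators i d acc =
        (acc ++ (ghlbScan tokens separators terminators i d []).1,
         (ghlbScan tokens separators terminators i d []).2) := by
  intro n
  induction n with
  | zero =>
    intro i d acc h
    have hi : ¬ i < tokens.length := by omega
    rw [ghlbScan_stop tokens separators terminators i d acc hi,
        ghlbScan_stop tokens separators terminators i d [] hi]
    simp
  | succ n ih =>
    intro i d acc h
    by_cases hi : i < tokens.length
    · by_cases hs : tokens[i] ∈ separators ∧ d = 0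
      · rw [ghlbScan_sep tokens separators terminators i d acc hi hs,
            ghlbScan_sep tokens separators terminators i d [] hi hs]
        rw [ih (i+1) _ (acc ++ [i]) (by omega), ih (i+1) _ ([] ++ [i]) (by omega)]
        simp
      · by_cases ht : tokens[i] ∈ terminators
        · rw [ghlbScan_term tokens separators terminators i d acc hi hs ht,
              ghlbScan_term tokens separators terminators i d [] hi hs ht]
          simp
        · rw [ghlbScan_else tokens separators terminators i d acc hi hs ht,
              ghlbScan_else tokens separators terminators i d [] hi hs ht]
          exact ih (i+1) _ acc (by omega)
    · rw [ghlbScan_stop tokens separators terminators i d acc hi,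
          ghlbScan_stop tokens separators terminators i d [] hi]
      simp

theorem ghlbScan_ge (tokens separators terminators : List String) :
    ∀ n i d, tokens.length - i ≤ n →
      (∀ c ∈ (ghlbScan tokens separators terminators i d []).1, i ≤ c) ∧
      (i ≤ (ghlbScan tokens separators terminators i d []).2 ∨
        (ghlbScan tokens separators terminators i d []).2 = tokens.length) := by
  intro n
  induction n with
  | zero =>
    intro i d h
    have hi : ¬ i < tokens.length := by omega
    rw [ghlbScan_stop tokens separators terminators i d [] hi]
    simp
  | succ n ih =>
    intro i d h
    by_cases hi : i < tokens.length
    · by_cases hs : tokens[i] ∈ separators ∧ d = 0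
      · rw [ghlbScan_sep tokens separators terminators i d [] hi hs]
        rw [ghlbScan_acc tokens separators terminators n (i+1) _ ([] ++ [i]) (by omega)]
        obtain ⟨h1, h2⟩ := ih (i+1)
          (if tokens[i] = "(" then d + 1 else if tokens[i] = ")" then d - 1 else d) (by omega)
        constructor
        · intro c hc
          simp only [List.nil_append, List.cons_append, List.mem_cons] at hc
          rcases hc with rfl | hc
          · omega
          · have := h1 c hc; omega
        · rcases h2 with h2 | h2
          · left; omega
          · right; exact h2
      · by_cases ht : tokens[i] ∈ terminators
        · rw [ghlbScan_term tokens separators terminators i d [] hi hs ht]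
          simp
        · rw [ghlbScan_else tokens separators terminators i d [] hi hs ht]
          obtain ⟨h1, h2⟩ := ih (i+1)
            (if tokens[i] = "(" then d + 1 else if tokens[i] = ")" then d - 1 else d) (by omega)
          refine ⟨fun c hc => by have := h1 c hc; omega, ?_⟩
          rcases h2 with h2 | h2
          · left; omega
          · right; exact h2
    · rw [ghlbScan_stop tokens separators terminators i d [] hi]
      simp

-- shifting the pending prefix by one consumed token
theorem ghlGroups_shift (tokens : List String) (cur : String) (i : Nat) (cuts : List Nat) (e : Nat)
    (hi : i < tokens.length)
    (hhead : ∀ c ∈ cuts, i + 1 ≤ c) (he : i + 1 ≤ e) :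
    ghlGroups tokens cur i cuts e = ghlGroups tokens (cur ++ tokens[i]) (i + 1) cuts e := by
  cases cuts with
  | nil =>
    have hsl : ghlbSlice tokens i e = tokens[i] ++ ghlbSlice tokens (i+1) e :=
      slice_cons tokens i e hi (by omega)
    simp [ghlGroups, hsl, String.append_assoc]
  | cons c rest =>
    have hc : i + 1 ≤ c := hhead c (List.mem_cons_self ..)
    have hsl : ghlbSlice tokens i c = tokens[i] ++ ghlbSlice tokens (i+1) c :=
      slice_cons tokens i c hi (by omega)
    simp [ghlGroups, hsl, String.append_assoc]

-- ---- the three bridging equalities ----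

theorem spec_eq_groups (tokens separators terminators : List String) :
    ∀ n i d cur, tokens.length - i ≤ n →
      ghlaSpec tokens separators terminators i d cur =
        ghlGroups tokens cur i (ghlbScan tokens separators terminators i d []).1
          (ghlbScan tokens separators terminators i d []).2 := by
  intro n
  induction n with
  | zero =>
    intro i d cur h
    have hi : ¬ i < tokens.length := by omega
    rw [ghlaSpec_stop tokens separators terminators i d cur hi,
        ghlbScan_stop tokens separators terminators i d [] hi]
    have hsl : ghlbSlice tokens i tokens.length = "" := slice_out tokens i _ (by omega)
    by_cases hc : cur = "" <;> simp [ghlGroups, hsl, hc, String.length_eq_zero_iff]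
  | succ n ih =>
    intro i d cur h
    by_cases hi : i < tokens.length
    · by_cases hs : tokens[i] ∈ separators ∧ d = 0
      · rw [ghlaSpec_sep tokens separators terminators i d cur hi hs,
            ghlbScan_sep tokens separators terminators i d [] hi hs]
        rw [ghlbScan_acc tokens separators terminators n (i+1) _ ([] ++ [i]) (by omega)]
        rw [ih (i+1) _ "" (by omega)]
        have hsl : ghlbSlice tokens i i = "" := slice_empty tokens i i (le_refl i)
        by_cases hc : cur = "" <;> simp [ghlGroups, hsl, hc, String.length_eq_zero_iff]
      · by_cases ht : tokens[i] ∈ terminators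
        · rw [ghlaSpec_term tokens separators terminators i d cur hi hs ht,
              ghlbScan_term tokens separators terminators i d [] hi hs ht]
          have hsl : ghlbSlice tokens i i = "" := slice_empty tokens i i (le_refl i)
          by_cases hc : cur = "" <;> simp [ghlGroups, hsl, hc, String.length_eq_zero_iff]
        · rw [ghlaSpec_else tokens separators terminators i d cur hi hs ht,
              ghlbScan_else tokens separators terminators i d [] hi hs ht]
          rw [ih (i+1) _ (cur ++ tokens[i]) (by omega)]
          obtain ⟨h1, h2⟩ := ghlbScan_ge tokens separators terminators n (i+1)
            (if tokens[i] = "(" then d + 1 else if tokens[i] = ")" then d - 1 else d) (by omega)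
          have he : i + 1 ≤ (ghlbScan tokens separators terminators (i+1)
              (if tokens[i] = "(" then d + 1 else if tokens[i] = ")" then d - 1 else d) []).2 := by
            rcases h2 with h2 | h2
            · exact h2
            · omega
          exact (ghlGroups_shift tokens cur i _ _ hi h1 he).symm
    · rw [ghlaSpec_stop tokens separators terminators i d cur hi,
          ghlbScan_stop tokens separators terminators i d [] hi]
      have hsl : ghlbSlice tokens i tokens.length = "" := slice_out tokens i _ (by omega)
      by_cases hc : cur = "" <;> simp [ghlGroups, hsl, hc, String.length_eq_zero_iff]

theorem ghlaLoop_eq (tokens separators terminators : List String) :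
    ∀ n i d res cur, tokens.length - i ≤ n →
      ghlaLoop tokens separators terminators i d res cur =
        res ++ ghlaSpec tokens separators terminators i d cur := by
  intro n
  induction n with
  | zero =>
    intro i d res cur h
    have hi : ¬ i < tokens.length := by omega
    rw [ghlaLoop_stop tokens separators terminators i d res cur hi,
        ghlaSpec_stop tokens separators terminators i d cur hi]
    by_cases hc : cur.length ≠ 0 <;> simp [hc]
  | succ n ih =>
    intro i d res cur h
    by_cases hi : i < tokens.length
    · by_cases hs : tokens[i] ∈ separators ∧ d = 0
      · rw [ghlaLoop_sep tokens separators terminators i d res cur hi hs,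
            ghlaSpec_sep tokens separators terminators i d cur hi hs]
        rw [ih (i+1) _ _ "" (by omega)]
        by_cases hc : cur.length ≠ 0 <;> simp [hc]
      · by_cases ht : tokens[i] ∈ terminators
        · rw [ghlaLoop_term tokens separators terminators i d res cur hi hs ht,
              ghlaSpec_term tokens separators terminators i d cur hi hs ht]
          by_cases hc : cur.length ≠ 0 <;> simp [hc]
        · rw [ghlaLoop_else tokens separators terminators i d res cur hi hs ht,
              ghlaSpec_else tokens separators terminators i d cur hi hs ht]
          exact ih (i+1) _ res (cur ++ tokens[i]) (by omega)
    · rw [ghlaLoop_stop tokens separators terminators i d res cur hi,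
          ghlaSpec_stop tokens separators terminators i d cur hi]
      by_cases hc : cur.length ≠ 0 <;> simp [hc]

theorem zip_eq_groups (tokens : List String) :
    ∀ cuts a e,
      (((a :: cuts.map (· + 1)).zip (cuts ++ [e])).map
          (fun p => ghlbSlice tokens p.1 p.2)).filter (fun g => g ≠ "") =
        ghlGroups tokens "" a cuts e := by
  intro cuts
  induction cuts with
  | nil =>
    intro a e
    simp only [List.map_nil, List.nil_append, List.zip_cons_cons, List.zip_nil_right,
      List.map_cons, List.map_nil, List.filter]
    by_cases hg : ghlbSlice tokens a e = "" <;> simp [ghlGroups, hg]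
  | cons c rest ih =>
    intro a e
    simp only [List.map_cons, List.cons_append, List.zip_cons_cons, List.map_cons, List.filter]
    rw [ih (c + 1) e]
    by_cases hg : ghlbSlice tokens a c = "" <;> simp [ghlGroups, hg]

-- ===== VERDICT (by name: the statement is the Claim_ definition above) =====
theorem get_highest_level_arguments_spec : Claim_equal_get_highest_level_arguments := by
  intro tokens open_brackets separators terminators _hDom
  unfold Spec_get_highest_level_arguments get_highest_level_arguments get_highest_level_arguments_alt
  rw [ghlaLoop_eq tokens separators terminators tokens.length 0 open_brackets [] "" (by omega)]
  rw [spec_eq_groups tokens separators terminators tokens.length 0 open_brackets "" (by omega)]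
  simp only [List.nil_append]
  exact (zip_eq_groups tokens (ghlbScan tokens separators terminators 0 open_brackets []).1 0
    (ghlbScan tokens separators terminators 0 open_brackets []).2).symm
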